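-- pv_equiv track=rewrite | github.com/jh-choi98/leetcode | Algorithm/DFS/dfs_sol.py | dfs_find_path_optimized
-- ===== SOURCE A (Python) =====
-- def dfs_find_path_optimized(graph, start, end, path=None):
--     visited = set()
--     path = []
--
--     def _dfs_helper(cur_node):
--         path.append(cur_node)
--         visited.add(cur_node)
--
--         if cur_node == end:
--             return list(path)
--
--         for neighbor in graph.get(cur_node, []):
--             if neighbor not in visited:
--                 result = _dfs_helper(neighbor)
--                 if result:
--                     return result
--         path.pop()
--         return None
--     return _dfs_helper(start)
-- ===== SOURCE B (Python) =====
-- def dfs_find_path_optimized(graph, start, end, path=None):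
--     visited = set()
--     stack = [(start, [start])]
--     while stack:
--         node, p = stack.pop()
--         if node in visited:
--             continue
--         visited.add(node)
--         if node == end:
--             return p
--         for nb in reversed(graph.get(node, [])):
--             if nb not in visited:
--                 stack.append((nb, p + [nb]))
--     return None
-- ===== Notes on version B (the rewrite author's own statement) =====
-- stated objective: alternative
-- what changed: Replaces the nested recursive helper that mutates a shared path/visited pair with a single iterative loop over an explicit stack of (node, path) tuples; neighbours are pushed in reversed order so the LIFO pop order reproduces the recursive preorder and hence the identical returned path.
import Mathlib
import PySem

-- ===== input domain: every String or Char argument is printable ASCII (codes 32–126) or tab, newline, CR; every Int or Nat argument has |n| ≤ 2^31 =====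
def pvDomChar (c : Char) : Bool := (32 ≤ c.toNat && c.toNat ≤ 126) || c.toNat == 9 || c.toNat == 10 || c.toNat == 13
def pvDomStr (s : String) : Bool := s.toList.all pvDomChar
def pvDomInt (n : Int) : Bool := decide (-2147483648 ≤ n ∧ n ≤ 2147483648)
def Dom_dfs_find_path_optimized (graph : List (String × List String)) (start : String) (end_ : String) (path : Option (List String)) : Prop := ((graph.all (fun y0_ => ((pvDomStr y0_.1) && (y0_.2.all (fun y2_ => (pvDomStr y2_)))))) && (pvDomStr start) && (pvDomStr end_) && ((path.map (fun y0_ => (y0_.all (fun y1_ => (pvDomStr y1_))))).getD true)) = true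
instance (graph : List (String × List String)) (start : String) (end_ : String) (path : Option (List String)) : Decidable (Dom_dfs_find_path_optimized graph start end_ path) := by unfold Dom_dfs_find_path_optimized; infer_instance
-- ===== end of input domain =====

-- B replaces A's recursive helper (shared mutable path/visited) by one iterative loop over an
-- explicit stack of (node, path) pairs, pushing neighbours reversed so the returned path is identical.

-- Universe of node names that can ever be visited (start plus every neighbour list entry);
-- used ONLY as a termination measure / termination guard for both ports.
def pvNodes (graph : List (String × List String)) (start : String) : List String :=
  start :: (graph.map Prod.snd).flatten

-- number of universe entries not yet visited (termination measure)
def pvRem (U : List String) (v : PySem.Set String) : Nat :=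
  (U.filter (fun x => !(PySem.Set.contains v x))).length

theorem pvNotContains (w : PySem.Set String) (a : String) :
    (!PySem.Set.contains w a) = true ↔ a ∉ w := by
  simp [PySem.Set.contains]

theorem pvNotContains_false (w : PySem.Set String) (a : String) :
    (!PySem.Set.contains w a) = false ↔ a ∈ w := by
  simp [PySem.Set.contains]

theorem pvRem_add_le (U : List String) (v : PySem.Set String) (y : String) :
    pvRem U (PySem.Set.add v y) ≤ pvRem U v := by
  simp only [pvRem]
  rw [← List.countP_eq_length_filter, ← List.countP_eq_length_filter]
  apply List.countP_mono_left
  intro a _ h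
  rw [pvNotContains] at h ⊢
  exact fun hm => h ((PySem.Set.mem_add v y a).mpr (Or.inl hm))

theorem pvRem_add_lt (U : List String) (v : PySem.Set String) (x : String)
    (hU : x ∈ U) (hv : x ∉ v) :
    pvRem U (PySem.Set.add v x) < pvRem U v := by
  induction U with
  | nil => cases hU
  | cons u U ih =>
    simp only [pvRem, List.filter_cons]
    by_cases hux : u = x
    · subst hux
      have c1 : ¬((!PySem.Set.contains (PySem.Set.add v u) u) = true) := by
        rw [pvNotContains]
        exact fun hnot => hnot ((PySem.Set.mem_add v u u).mpr (Or.inr rfl))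
      have c2 : (!PySem.Set.contains v u) = true := (pvNotContains v u).mpr hv
      rw [if_neg c1, if_pos c2, List.length_cons]
      have hle := pvRem_add_le U v u
      simp only [pvRem] at hle
      omega
    · have hU' : x ∈ U := by
        cases hU with
        | head => exact absurd rfl hux
        | tail _ h => exact h
      have hcond : (!PySem.Set.contains (PySem.Set.add v x) u) = (!PySem.Set.contains v u) := by
        by_cases hu : u ∈ v
        · have h1 : u ∈ PySem.Set.add v x := (PySem.Set.mem_add v x u).mpr (Or.inl hu)
          rw [(pvNotContains_false _ u).mpr h1, (pvNotContains_false v u).mpr hu]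
        · have h1 : u ∉ PySem.Set.add v x := by
            rw [PySem.Set.mem_add]
            rintro (hh | hh)
            · exact hu hh
            · exact hux hh
          rw [(pvNotContains _ u).mpr h1, (pvNotContains v u).mpr hu]
      rw [hcond]
      have hrec := ih hU'
      simp only [pvRem] at hrec
      by_cases hcu : (!PySem.Set.contains v u) = true
      · rw [if_pos hcu, if_pos hcu, List.length_cons, List.length_cons]
        omega
      · rw [if_neg hcu, if_neg hcu]
        exact hrec

theorem pvRem_update_le (U : List String) (v : PySem.Set String) (ds : List String) :
    pvRem U (PySem.Set.update v ds) ≤ pvRem U v := by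
  induction ds generalizing v with
  | nil => exact Nat.le_refl _
  | cons d ds ih =>
    calc pvRem U (PySem.Set.update v (d :: ds))
        = pvRem U (PySem.Set.update (PySem.Set.add v d) ds) := rfl
      _ ≤ pvRem U (PySem.Set.add v d) := ih _
      _ ≤ pvRem U v := pvRem_add_le U v d

-- ===== PORT A =====
-- A's inner `_dfs_helper` mutates a shared `path` list (append / pop) and a shared `visited` set.
-- The port threads them functionally: the helper receives the current path and visited set and
-- returns, besides the result, the list `ds` of nodes it newly added to visited (in insertion
-- order), so the caller's visited set after the call is `PySem.Set.update visited ds`; `path.pop()`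
-- on failure is the identity on the caller's own path value.  The leading `if` is a pure
-- TERMINATION GUARD: in the Python, `_dfs_helper` is only invoked on nodes not yet visited and
-- drawn from `pvNodes graph start`, so the guard never fires on any actual call.
mutual
def dfsAHelper (graph : List (String × List String)) (end_ : String) (U : List String)
    (cur : String) (path : List String) (visited : PySem.Set String) :
    Option (List String) × List String :=
  if PySem.Set.contains visited cur || !(U.contains cur) then (none, [])  -- termination guard, never fires
  else
    let path' := path ++ [cur]                        -- path.append(cur_node)
    let visited' := PySem.Set.add visited cur         -- visited.add(cur_node)
    if cur == end_ then (some path', [cur])           -- return list(path)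
    else
      match dfsALoop graph end_ U (PySem.Dict.getD (PySem.Dict.mk graph) cur []) path' visited' with
      | (res, ds) => (res, cur :: ds)                 -- for-loop over graph.get(cur_node, []); path.pop() on failure
termination_by (pvRem U visited, 0, 0)
decreasing_by
  rename_i hg he
  have hh : cur ∉ visited ∧ cur ∈ U := by simpa using hg
  exact Prod.Lex.left _ _ (pvRem_add_lt U visited cur hh.2 hh.1)

def dfsALoop (graph : List (String × List String)) (end_ : String) (U : List String)
    (nbrs : List String) (path : List String) (visited : PySem.Set String) :
    Option (List String) × List String :=
  match nbrs with
  | [] => (none, [])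
  | n :: ns =>
    if PySem.Set.contains visited n then dfsALoop graph end_ U ns path visited  -- if neighbor not in visited
    else
      match dfsAHelper graph end_ U n path visited with
      | (some r, ds) => (some r, ds)                  -- if result: return result
      | (none, ds) =>
        match dfsALoop graph end_ U ns path (PySem.Set.update visited ds) with
        | (res, ds') => (res, ds ++ ds')
termination_by (pvRem U visited, 1, nbrs.length)
decreasing_by
  · apply Prod.Lex.right
    apply Prod.Lex.right
    simp only [List.length_cons]
    omega
  · apply Prod.Lex.right
    apply Prod.Lex.left
    omega
  · rcases Nat.lt_or_eq_of_le (pvRem_update_le U visited ds) with h | h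
    · exact Prod.Lex.left _ _ h
    · rw [h]
      apply Prod.Lex.right
      apply Prod.Lex.right
      simp only [List.length_cons]
      omega
end

def dfs_find_path_optimized (graph : List (String × List String)) (start : String)
    (end_ : String) (path : Option (List String)) : Option (List String) :=
  (dfsAHelper graph end_ (pvNodes graph start) start [] []).1  -- return _dfs_helper(start)

-- ===== PORT B =====
-- iterative DFS: pop (node, path); skip if visited; mark; return path at end; push unvisited
-- neighbours in reversed order.  The `!(U.contains node)` disjunct is a pure TERMINATION GUARD:
-- every node ever on the stack is start or a neighbour, i.e. in `pvNodes graph start`, so it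
-- never fires on any reachable state.
def dfsBLoop (graph : List (String × List String)) (end_ : String) (U : List String)
    (stack : List (String × List String)) (visited : PySem.Set String) :
    Option (List String) :=
  match stack with
  | [] => none                                        -- return None
  | (node, p) :: rest =>
    if PySem.Set.contains visited node || !(U.contains node) then  -- if node in visited: continue (U-part: termination guard)
      dfsBLoop graph end_ U rest visited
    else
      let visited' := PySem.Set.add visited node      -- visited.add(node)
      if node == end_ then some p                     -- return p
      else
        let stack' := ((PySem.Dict.getD (PySem.Dict.mk graph) node []).reverse).foldl
          (fun st nb => if PySem.Set.contains visited' nb then st else (nb, p ++ [nb]) :: st) rest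
        dfsBLoop graph end_ U stack' visited'
termination_by (pvRem U visited, stack.length)
decreasing_by
  · apply Prod.Lex.right
    simp only [List.length_cons]
    omega
  · rename_i h _
    have hh : node ∉ visited ∧ node ∈ U := by simpa using h
    exact Prod.Lex.left _ _ (pvRem_add_lt U visited node hh.2 hh.1)

def dfs_find_path_optimized_alt (graph : List (String × List String)) (start : String)
    (end_ : String) (path : Option (List String)) : Option (List String) :=
  dfsBLoop graph end_ (pvNodes graph start) [(start, [start])] []

-- ===== PRECONDITION & SPEC =====
def Spec_dfs_find_path_optimized (graph : List (String × List String)) (start : String) (end_ : String) (path : Option (List String)) (out : Option (List String)) : Prop := out = dfs_find_path_optimized_alt graph start end_ path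
instance (graph : List (String × List String)) (start : String) (end_ : String) (path : Option (List String)) (out : Option (List String)) : Decidable (Spec_dfs_find_path_optimized graph start end_ path out) := by unfold Spec_dfs_find_path_optimized; infer_instance

-- ===== CLAIM (what is proved, stated in full; the proofs are below) =====
def Claim_equal_dfs_find_path_optimized : Prop := ∀ (graph : List (String × List String)) (start : String) (end_ : String) (path : Option (List String)), Dom_dfs_find_path_optimized graph start end_ path → Spec_dfs_find_path_optimized graph start end_ path (dfs_find_path_optimized graph start end_ path)

-- ===== LEMMAS AND PROOFS =====

theorem pvUpdate_append (v : PySem.Set String) (ds ds' : List String) :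
    PySem.Set.update v (ds ++ ds') = PySem.Set.update (PySem.Set.update v ds) ds' := by
  simp [PySem.Set.update, List.foldl_append]

theorem pvMem_update_mono (v : PySem.Set String) (ds : List String) (x : String)
    (h : x ∈ v) : x ∈ PySem.Set.update v ds := by
  induction ds generalizing v with
  | nil => exact h
  | cons d ds ih => exact ih _ ((PySem.Set.mem_add v d x).mpr (Or.inl h))

-- one-step unfolding equations for the three recursive functions
theorem dfsAHelper_eq (graph : List (String × List String)) (end_ : String) (U : List String)
    (cur : String) (path : List String) (v : PySem.Set String) :
    dfsAHelper graph end_ U cur path v =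
      if PySem.Set.contains v cur || !(U.contains cur) then (none, [])
      else if cur == end_ then (some (path ++ [cur]), [cur])
      else match dfsALoop graph end_ U (PySem.Dict.getD (PySem.Dict.mk graph) cur [])
                (path ++ [cur]) (PySem.Set.add v cur) with
           | (res, ds) => (res, cur :: ds) := by
  rw [dfsAHelper.eq_def]

theorem dfsALoop_nil (graph : List (String × List String)) (end_ : String) (U : List String)
    (path : List String) (v : PySem.Set String) :
    dfsALoop graph end_ U [] path v = (none, []) := by
  rw [dfsALoop.eq_def]

theorem dfsALoop_cons (graph : List (String × List String)) (end_ : String) (U : List String)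
    (n : String) (ns : List String) (path : List String) (v : PySem.Set String) :
    dfsALoop graph end_ U (n :: ns) path v =
      if PySem.Set.contains v n then dfsALoop graph end_ U ns path v
      else match dfsAHelper graph end_ U n path v with
           | (some r, ds) => (some r, ds)
           | (none, ds) =>
             match dfsALoop graph end_ U ns path (PySem.Set.update v ds) with
             | (res, ds') => (res, ds ++ ds') := by
  rw [dfsALoop.eq_def]

theorem dfsBLoop_nil (graph : List (String × List String)) (end_ : String) (U : List String)
    (v : PySem.Set String) :
    dfsBLoop graph end_ U [] v = none := by
  rw [dfsBLoop.eq_def]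

theorem dfsBLoop_cons (graph : List (String × List String)) (end_ : String) (U : List String)
    (node : String) (p : List String) (rest : List (String × List String))
    (v : PySem.Set String) :
    dfsBLoop graph end_ U ((node, p) :: rest) v =
      if PySem.Set.contains v node || !(U.contains node) then dfsBLoop graph end_ U rest v
      else if node == end_ then some p
      else dfsBLoop graph end_ U
        (((PySem.Dict.getD (PySem.Dict.mk graph) node []).reverse).foldl
          (fun st nb => if PySem.Set.contains (PySem.Set.add v node) nb then st
                        else (nb, p ++ [nb]) :: st) rest)
        (PySem.Set.add v node) := by
  rw [dfsBLoop.eq_def]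

-- the fold that pushes the reversed, not-yet-visited neighbours equals a filter+map prepend
theorem pvPushes_eq (ns : List String) (v : PySem.Set String) (p : List String)
    (rest : List (String × List String)) :
    ns.reverse.foldl (fun st nb => if PySem.Set.contains v nb then st else (nb, p ++ [nb]) :: st) rest
      = (ns.filter (fun nb => !(PySem.Set.contains v nb))).map (fun nb => (nb, p ++ [nb])) ++ rest := by
  rw [List.foldl_reverse]
  induction ns with
  | nil => rfl
  | cons n ns ih =>
    rw [List.foldr_cons, ih, List.filter_cons]
    by_cases hv : PySem.Set.contains v n = true
    · have hm : n ∈ v := by simpa using hv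
      rw [if_pos hv, if_neg (fun hh => ((pvNotContains v n).mp hh) hm)]
    · rw [if_neg hv, if_pos (by simp_all), List.map_cons, List.cons_append]

-- the simulation: popping one stack entry behaves like one call of A's helper, and the pushed
-- block of neighbour entries behaves like A's for-loop over the neighbours
theorem pvSim (graph : List (String × List String)) (end_ : String) (U : List String) (k : Nat) :
    (∀ (cur : String) (p : List String) (rest : List (String × List String))
        (v : PySem.Set String), pvRem U v ≤ k →
      dfsBLoop graph end_ U ((cur, p ++ [cur]) :: rest) v
        = match dfsAHelper graph end_ U cur p v with
          | (some r, _) => some r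
          | (none, ds) => dfsBLoop graph end_ U rest (PySem.Set.update v ds)) ∧
    (∀ (ns : List String) (p : List String) (rest : List (String × List String))
        (v vPush : PySem.Set String), pvRem U v ≤ k →
      (∀ x, x ∈ vPush → x ∈ v) →
      dfsBLoop graph end_ U
          ((ns.filter (fun nb => !(PySem.Set.contains vPush nb))).map (fun nb => (nb, p ++ [nb])) ++ rest) v
        = match dfsALoop graph end_ U ns p v with
          | (some r, _) => some r
          | (none, ds) => dfsBLoop graph end_ U rest (PySem.Set.update v ds)) := by
  induction k using Nat.strong_induction_on with
  | _ k IH =>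
    have hmain : ∀ (cur : String) (p : List String) (rest : List (String × List String))
        (v : PySem.Set String), pvRem U v ≤ k →
        dfsBLoop graph end_ U ((cur, p ++ [cur]) :: rest) v
          = match dfsAHelper graph end_ U cur p v with
            | (some r, _) => some r
            | (none, ds) => dfsBLoop graph end_ U rest (PySem.Set.update v ds) := by
      intro cur p rest v hk
      rw [dfsBLoop_cons, dfsAHelper_eq]
      by_cases hg : (PySem.Set.contains v cur || !(U.contains cur)) = true
      · rw [if_pos hg, if_pos hg]
        rfl
      · rw [if_neg hg, if_neg hg]
        have hmem : cur ∉ v ∧ cur ∈ U := by simpa using hg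
        by_cases he : (cur == end_) = true
        · rw [if_pos he, if_pos he]
        · rw [if_neg he, if_neg he]
          have hlt : pvRem U (PySem.Set.add v cur) < k :=
            Nat.lt_of_lt_of_le (pvRem_add_lt U v cur hmem.2 hmem.1) hk
          have hsub := (IH _ hlt).2 (PySem.Dict.getD (PySem.Dict.mk graph) cur [])
            (p ++ [cur]) rest (PySem.Set.add v cur) (PySem.Set.add v cur)
            (Nat.le_refl _) (fun _ h => h)
          rw [pvPushes_eq, hsub]
          cases hA : dfsALoop graph end_ U (PySem.Dict.getD (PySem.Dict.mk graph) cur [])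
              (p ++ [cur]) (PySem.Set.add v cur) with
          | mk res ds =>
            cases res with
            | some r => rfl
            | none => rfl
    refine ⟨hmain, ?_⟩
    intro ns p rest v vPush hk hsubset
    induction ns generalizing v vPush rest with
    | nil =>
      simp only [List.filter_nil, List.map_nil, List.nil_append]
      rw [dfsALoop_nil]
      rfl
    | cons n ns ihns =>
      by_cases hn : n ∈ vPush
      · have hfc : ¬((!PySem.Set.contains vPush n) = true) := by
          rw [pvNotContains]
          exact fun hh => hh hn
        rw [List.filter_cons, if_neg hfc, dfsALoop_cons]
        have hvn : PySem.Set.contains v n = true := by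
          simp [PySem.Set.contains, hsubset n hn]
        rw [if_pos hvn]
        exact ihns rest v vPush hk hsubset
      · have hfc : (!PySem.Set.contains vPush n) = true := (pvNotContains vPush n).mpr hn
        rw [List.filter_cons, if_pos hfc, List.map_cons, List.cons_append]
        rw [hmain n p _ v hk]
        rw [dfsALoop_cons]
        by_cases hvn : PySem.Set.contains v n = true
        · have hguard : (PySem.Set.contains v n || !(U.contains n)) = true := by
            rw [hvn]
            exact Bool.true_or _
          rw [dfsAHelper_eq, if_pos hguard, if_pos hvn]
          exact ihns rest v vPush hk hsubset
        · rw [if_neg hvn]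
          cases hH : dfsAHelper graph end_ U n p v with
          | mk res ds =>
            cases res with
            | some r => rfl
            | none =>
              have hk' : pvRem U (PySem.Set.update v ds) ≤ k :=
                Nat.le_trans (pvRem_update_le U v ds) hk
              have hsubset' : ∀ x, x ∈ vPush → x ∈ PySem.Set.update v ds :=
                fun x hx => pvMem_update_mono v ds x (hsubset x hx)
              simp only []
              rw [ihns rest (PySem.Set.update v ds) vPush hk' hsubset']
              cases hL : dfsALoop graph end_ U ns p (PySem.Set.update v ds) with
              | mk res' ds' =>
                cases res' with
                | some r => rfl
                | none =>
                  show dfsBLoop graph end_ U rest (PySem.Set.update (PySem.Set.update v ds) ds')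
                      = dfsBLoop graph end_ U rest (PySem.Set.update v (ds ++ ds'))
                  rw [pvUpdate_append]

-- ===== VERDICT (by name: the statement is the Claim_ definition above) =====
theorem dfs_find_path_optimized_spec : Claim_equal_dfs_find_path_optimized := by
  intro graph start end_ path _
  unfold Spec_dfs_find_path_optimized dfs_find_path_optimized dfs_find_path_optimized_alt
  have h := (pvSim graph end_ (pvNodes graph start) (pvRem (pvNodes graph start) [])).1
    start [] [] [] (Nat.le_refl _)
  simp only [List.nil_append] at h
  rw [h]
  cases hh : dfsAHelper graph end_ (pvNodes graph start) start [] [] with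
  | mk res ds =>
    cases res with
    | some r => rfl
    | none =>
      show (none : Option (List String))
          = dfsBLoop graph end_ (pvNodes graph start) [] (PySem.Set.update [] ds)
      rw [dfsBLoop_nil]
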